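-- pv_equiv track=rewrite | github.com/Leomeet/test | python_practicals/practical_1.py | convert_number_to_word
-- ===== SOURCE A (Python) =====
-- number_to_word = {0:'zero',1: 'one', 2: 'two', 3: 'three', 4: 'four',
--                   5: 'five', 6: 'six', 7: 'seven', 8: 'eight', 9: 'nine'}
--
-- def convert_number_to_word(next: int, numeric_word: str, string: str) -> str:
--     """
--     converts a number into a string of words.
--
--     Args:
--         next (int): starting index numeric word
--         numeric_word (str): "" (func generated numeric value string)
--         string (str): Target String of numbers
--
--     Returns:
--         str: word string of numeric value
--     """
--
--     if next < len(string):
--         index = string[next]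
--         numeric_word += number_to_word[int(index)]
--         res = convert_number_to_word(next+1, numeric_word, string)
--         if res != "":
--             return res
--     else:
--         return numeric_word
-- ===== SOURCE B (Python) =====
-- number_to_word = {0: 'zero', 1: 'one', 2: 'two', 3: 'three', 4: 'four',
--                   5: 'five', 6: 'six', 7: 'seven', 8: 'eight', 9: 'nine'}
--
-- def convert_number_to_word(next: int, numeric_word: str, string: str) -> str:
--     for i in range(next, len(string)):
--         numeric_word += number_to_word[int(string[i])]
--     return numeric_word
-- ===== Notes on version B (the rewrite author's own statement) =====
-- stated objective: simpler
-- what changed: Replaced A's recursion with accumulator threading and its redundant res != "" check by a single flat for-loop over range(next, len(string)) with direct indexing.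
import Mathlib
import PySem

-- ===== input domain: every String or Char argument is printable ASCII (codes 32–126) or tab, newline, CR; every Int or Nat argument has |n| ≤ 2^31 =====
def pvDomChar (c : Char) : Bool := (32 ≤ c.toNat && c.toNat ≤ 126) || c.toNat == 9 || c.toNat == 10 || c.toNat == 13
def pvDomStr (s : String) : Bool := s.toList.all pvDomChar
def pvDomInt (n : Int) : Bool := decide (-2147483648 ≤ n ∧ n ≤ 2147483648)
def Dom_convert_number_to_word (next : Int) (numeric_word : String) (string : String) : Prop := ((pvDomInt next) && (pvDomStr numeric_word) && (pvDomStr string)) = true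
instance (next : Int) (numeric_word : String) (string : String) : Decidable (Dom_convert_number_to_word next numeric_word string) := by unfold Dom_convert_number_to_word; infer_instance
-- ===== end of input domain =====

-- B replaces A's recursion (with its redundant res != "" check) by a single iterative
-- loop over range(next, len(string)) with direct indexing; objective: simpler.


-- ===== PORT A =====
-- number_to_word = {0:'zero', …, 9:'nine'}
def numberToWord : PySem.Dict Int String :=
  PySem.Dict.ofList [((0:Int),"zero"),(1,"one"),(2,"two"),(3,"three"),(4,"four"),
                     (5,"five"),(6,"six"),(7,"seven"),(8,"eight"),(9,"nine")]

-- Literal port of A's recursion; the raising paths (IndexError / ValueError / KeyError /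
-- the fall-through returning None) yield "" here and are excluded by Pre_.
def convert_number_to_word (next : Int) (numeric_word : String) (string : String) : String :=
  if _h : next < (string.toList.length : Int) then
    match PySem.List.pyGet? string.toList next with   -- index = string[next]
    | none => ""                                      -- IndexError (outside Pre_)
    | some index =>
      match PySem.Int.ofChars? [index] with           -- int(index)
      | none => ""                                    -- ValueError (outside Pre_)
      | some n =>
        match numberToWord.get? n with                -- number_to_word[…]
        | none => ""                                  -- KeyError (unreachable)
        | some w =>
          let numeric_word := numeric_word ++ w
          let res := convert_number_to_word (next+1) numeric_word string
          if res ≠ "" then res else ""                -- else: Python returns None (outside Pre_)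
  else numeric_word
termination_by ((string.toList.length : Int) - next).toNat
decreasing_by omega

-- ===== PORT B =====
-- for i in range(next, len(string)): numeric_word += number_to_word[int(string[i])]
def convert_number_to_word_alt (next : Int) (numeric_word : String) (string : String) : String :=
  (PySem.List.pyRange next (string.toList.length : Int) 1).foldl
    (fun acc i =>
      match PySem.List.pyGet? string.toList i with
      | none => acc                                   -- IndexError (outside Pre_)
      | some c =>
        match PySem.Int.ofChars? [c] with
        | none => acc                                 -- ValueError (outside Pre_)
        | some n =>
          match numberToWord.get? n with
          | none => acc                               -- KeyError (unreachable)
          | some w => acc ++ w)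
    numeric_word

-- ===== PRECONDITION & SPEC =====
def digitChars : List Char := ['0','1','2','3','4','5','6','7','8','9']

-- Pre_ excludes exactly the inputs where A raises: next below -len(string) (IndexError)
-- or a visited character that is not a decimal digit (ValueError); with negative next
-- the visit wraps to the end and then continues from 0, so the whole string is visited.
def Pre_convert_number_to_word (next : Int) (numeric_word : String) (string : String) : Prop :=
  next < (string.toList.length : Int) →
    (-(string.toList.length : Int) ≤ next ∧
     ((string.toList.drop (if next < 0 then 0 else next.toNat)).all
        (fun c => digitChars.contains c)) = true)
instance (next : Int) (numeric_word : String) (string : String) : Decidable (Pre_convert_number_to_word next numeric_word string) := by unfold Pre_convert_number_to_word; infer_instance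

def pvWitness_convert_number_to_word : Int × String × String := (0, "", "407")

def Spec_convert_number_to_word (next : Int) (numeric_word : String) (string : String) (out : String) : Prop := out = convert_number_to_word_alt next numeric_word string
instance (next : Int) (numeric_word : String) (string : String) (out : String) : Decidable (Spec_convert_number_to_word next numeric_word string out) := by unfold Spec_convert_number_to_word; infer_instance

-- ===== CLAIM (what is proved, stated in full; the proofs are below) =====
def Claim_equal_convert_number_to_word : Prop := ∀ (next : Int) (numeric_word : String) (string : String), Dom_convert_number_to_word next numeric_word string → Pre_convert_number_to_word next numeric_word string → Spec_convert_number_to_word next numeric_word string (convert_number_to_word next numeric_word string)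

-- ===== LEMMAS AND PROOFS =====

-- For every digit character the int() + dict-lookup pipeline succeeds with a nonempty word.
lemma step_digit : ∀ c ∈ digitChars, ∃ n w, PySem.Int.ofChars? [c] = some n ∧
    numberToWord.get? n = some w ∧ w ≠ "" := by
  intro c hc
  fin_cases hc <;> exact ⟨_, _, rfl, rfl, by decide⟩

lemma append_ne_empty (a w : String) (hw : w ≠ "") : a ++ w ≠ "" := by
  intro h
  apply hw
  have := congrArg String.toList h
  simp [String.toList_append] at this
  cases this.2
  rfl

-- Pre_ propagates from next to next+1 (when next < len).
lemma pre_step (next : Int) (nw s : String)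
    (hp : Pre_convert_number_to_word next nw s)
    (hlt : next < (s.toList.length : Int)) :
    Pre_convert_number_to_word (next+1) nw s := by
  obtain ⟨hge, hdig⟩ := hp hlt
  rw [List.all_eq_true] at hdig
  intro hlt'
  refine ⟨by omega, ?_⟩
  rw [List.all_eq_true]
  intro c hc
  apply hdig
  by_cases h0 : next < 0
  · have h1 : (if next + 1 < 0 then 0 else (next+1).toNat) = if next + 1 < 0 then 0 else (next+1).toNat := rfl
    simp only [h0, if_true]
    split at hc
    · simpa using hc
    · exact List.mem_of_mem_drop hc
  · have hn1 : ¬ next + 1 < 0 := by omega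
    simp only [h0, if_false]
    simp only [hn1, if_false] at hc
    have : s.toList.drop (next+1).toNat = (s.toList.drop next.toNat).drop 1 := by
      rw [List.drop_drop]
      congr 1
      omega
    rw [this] at hc
    exact List.mem_of_mem_drop hc

-- The visited character is a digit under Pre_.
lemma visited_digit (next : Int) (nw s : String) (c : Char)
    (hp : Pre_convert_number_to_word next nw s)
    (hlt : next < (s.toList.length : Int))
    (hg : PySem.List.pyGet? s.toList next = some c) : c ∈ digitChars := by
  obtain ⟨hge, hdig⟩ := hp hlt
  rw [List.all_eq_true] at hdig
  by_cases h0 : next < 0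
  · have hc : c ∈ s.toList := PySem.List.mem_of_pyGet?_eq_some s.toList hg
    have : s.toList.drop (if next < 0 then 0 else next.toNat) = s.toList := by
      simp [h0]
    simpa using hdig c (by rw [this]; exact hc)
  · have h0' : 0 ≤ next := by omega
    rw [PySem.List.pyGet?_of_nonneg s.toList h0'] at hg
    have hlen : next.toNat < s.toList.length := by omega
    rw [List.getElem?_eq_getElem hlen] at hg
    have : c ∈ s.toList.drop next.toNat := by
      cases hg
      have hm : (s.toList.drop next.toNat)[0]'(by simpa using hlen) ∈
          s.toList.drop next.toNat := List.getElem_mem _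
      simpa using hm
    simp only [h0, if_false] at hdig
    simpa using hdig c this

-- A returns a nonempty string whenever its seed is nonempty (under Pre_).
lemma a_ne_empty (next : Int) (nw s : String)
    (hp : Pre_convert_number_to_word next nw s) (hnw : nw ≠ "") :
    convert_number_to_word next nw s ≠ "" := by
  by_cases hlt : next < (s.toList.length : Int)
  · obtain ⟨hge, _⟩ := hp hlt
    obtain ⟨c, hc⟩ : ∃ c, PySem.List.pyGet? s.toList next = some c := by
      cases hpg : PySem.List.pyGet? s.toList next with
      | none =>
        exfalso
        rw [PySem.List.pyGet?_eq_none_iff] at hpg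
        exact hpg ⟨hge, hlt⟩
      | some c => exact ⟨c, rfl⟩
    have hcd := visited_digit next nw s c hp hlt hc
    obtain ⟨n, w, hn, hw, hwne⟩ := step_digit c hcd
    have hrec := a_ne_empty (next+1) (nw ++ w) s (pre_step next nw s hp hlt)
      (append_ne_empty nw w hwne)
    rw [convert_number_to_word]
    simp only [hlt, dif_pos, hc, hn, hw]
    rw [if_pos hrec]
    exact hrec
  · rw [convert_number_to_word]
    simp only [hlt, dif_neg, not_false_eq_true]
    exact hnw
termination_by ((s.toList.length : Int) - next).toNat
decreasing_by omega

-- Main equivalence: A equals B on Pre_.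
lemma main_eq (next : Int) (nw s : String)
    (hp : Pre_convert_number_to_word next nw s) :
    convert_number_to_word next nw s = convert_number_to_word_alt next nw s := by
  by_cases hlt : next < (s.toList.length : Int)
  · obtain ⟨hge, _⟩ := hp hlt
    obtain ⟨c, hc⟩ : ∃ c, PySem.List.pyGet? s.toList next = some c := by
      cases hpg : PySem.List.pyGet? s.toList next with
      | none =>
        exfalso
        rw [PySem.List.pyGet?_eq_none_iff] at hpg
        exact hpg ⟨hge, hlt⟩
      | some c => exact ⟨c, rfl⟩
    have hcd := visited_digit next nw s c hp hlt hc
    obtain ⟨n, w, hn, hw, hwne⟩ := step_digit c hcd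
    have hpre' := pre_step next nw s hp hlt
    have hne := a_ne_empty (next+1) (nw ++ w) s hpre' (append_ne_empty nw w hwne)
    have ih := main_eq (next+1) (nw ++ w) s hpre'
    rw [convert_number_to_word]
    simp only [hlt, dif_pos, hc, hn, hw]
    rw [if_pos hne, ih]
    rw [convert_number_to_word_alt, convert_number_to_word_alt,
        PySem.List.pyRange_one_cons hlt, List.foldl_cons]
    simp only [hc, hn, hw]
  · rw [convert_number_to_word, convert_number_to_word_alt]
    simp only [hlt, dif_neg, not_false_eq_true]
    rw [PySem.List.pyRange_one_eq_nil (by omega)]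
    rfl
termination_by ((s.toList.length : Int) - next).toNat
decreasing_by omega

-- ===== VERDICT (by name: the statement is the Claim_ definition above) =====
theorem convert_number_to_word_spec : Claim_equal_convert_number_to_word := by
  intro next nw s _ hp
  unfold Spec_convert_number_to_word
  exact main_eq next nw s hp
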